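-- pv_equiv track=rewrite | github.com/DominikWojtanowski/Matura-informatyka | 2015 - Maj/Zadanie 4/zadanie_4.py | zad4PodpunktB
-- ===== SOURCE A (Python) =====
-- def zad4PodpunktB(line: str) -> bool:
--     bloki = []
--     tmpblok = []
--     lineLen = line.__len__()
--
--
--     for i in range(0, lineLen - 1):
--         if line[i] == line[i+1]:
--             tmpblok.append(line[i])
--         else:
--             tmpblok.append(line[i])
--             bloki.append(tmpblok)
--             tmpblok = []
--     tmpblok.append(line[lineLen-1])
--     bloki.append(tmpblok)
--
--     if bloki.__len__() != 2:
--         return False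
--     else:
--         if '1' not in bloki[0] and '0' not in bloki[1]:
--             return True
--         else:
--             return False
-- ===== SOURCE B (Python) =====
-- def zad4PodpunktB(line: str) -> bool:
--     transitions = sum(a != b for a, b in zip(line, line[1:]))
--     return line[0] != '1' and line[-1] != '0' and transitions == 1
-- ===== Notes on version B (the rewrite author's own statement) =====
-- stated objective: simpler
-- what changed: Replaces the explicit construction of run-blocks (two growing lists, final membership tests on the blocks) with a single adjacent-transition count plus the two endpoint character tests.
import Mathlib
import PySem

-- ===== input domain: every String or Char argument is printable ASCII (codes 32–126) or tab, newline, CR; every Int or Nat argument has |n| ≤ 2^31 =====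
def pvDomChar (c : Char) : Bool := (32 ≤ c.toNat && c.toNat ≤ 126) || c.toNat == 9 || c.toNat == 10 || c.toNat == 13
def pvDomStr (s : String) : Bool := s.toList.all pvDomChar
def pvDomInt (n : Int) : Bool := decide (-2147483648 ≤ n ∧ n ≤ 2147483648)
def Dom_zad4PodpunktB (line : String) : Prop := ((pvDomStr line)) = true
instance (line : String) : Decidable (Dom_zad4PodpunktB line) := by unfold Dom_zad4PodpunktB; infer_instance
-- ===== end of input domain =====

-- B replaces A's run-block construction by a single adjacent-transition count plus
-- the two endpoint tests (simpler); both raise IndexError on "" (excluded by Pre_).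

-- ===== PORT A =====
-- the loop body of A: one step over the pair (line[i], line[i+1])
def pvStepA (st : List (List Char) × List Char) (a b : Char) : List (List Char) × List Char :=
  if a == b then (st.1, st.2 ++ [a]) else (st.1 ++ [st.2 ++ [a]], [])

def zad4PodpunktB (line : String) : Bool :=
  let cs := line.toList
  let lineLen : Int := cs.length
  let st := (PySem.List.pyRange 0 (lineLen - 1) 1).foldl
      (fun st i => pvStepA st (PySem.List.pyGetD cs i ' ') (PySem.List.pyGetD cs (i + 1) ' '))
      ([], [])
  let bloki := st.1 ++ [st.2 ++ [PySem.List.pyGetD cs (lineLen - 1) ' ']]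
  if bloki.length ≠ 2 then false
  else if '1' ∉ bloki.getD 0 [] ∧ '0' ∉ bloki.getD 1 [] then true else false

-- ===== PORT B =====
def zad4PodpunktB_alt (line : String) : Bool :=
  let cs := line.toList
  let transitions : Int := ((cs.zip cs.tail).map (fun p => if p.1 ≠ p.2 then (1 : Int) else 0)).sum
  (!(PySem.List.pyGetD cs 0 ' ' == '1')) && (!(PySem.List.pyGetD cs (-1) ' ' == '0'))
    && (transitions == 1)

-- ===== PRECONDITION & SPEC =====
-- Pre_ excludes only the empty string, on which A raises IndexError (line[-1]).
def Pre_zad4PodpunktB (line : String) : Prop := line ≠ ""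
instance (line : String) : Decidable (Pre_zad4PodpunktB line) := by
  unfold Pre_zad4PodpunktB; infer_instance
def pvWitness_zad4PodpunktB : String := "0011"

def Spec_zad4PodpunktB (line : String) (out : Bool) : Prop := out = zad4PodpunktB_alt line
instance (line : String) (out : Bool) : Decidable (Spec_zad4PodpunktB line out) := by
  unfold Spec_zad4PodpunktB; infer_instance

-- ===== CLAIM (what is proved, stated in full; the proofs are below) =====
def Claim_equal_zad4PodpunktB : Prop := ∀ (line : String), Dom_zad4PodpunktB line → Pre_zad4PodpunktB line → Spec_zad4PodpunktB line (zad4PodpunktB line)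

-- ===== LEMMAS AND PROOFS =====

-- the run decomposition A's loop builds, as a structural recursion (T = pending block)
def pvRuns (T : List Char) (a : Char) (l : List Char) : List (List Char) :=
  match l with
  | [] => [T ++ [a]]
  | b :: t => if a == b then pvRuns (T ++ [a]) b t else (T ++ [a]) :: pvRuns [] b t

-- number of adjacent transitions in a :: l
def pvTrans (a : Char) (l : List Char) : Nat :=
  match l with
  | [] => 0
  | b :: t => (if a == b then 0 else 1) + pvTrans b t

lemma pvRuns_ne_nil (T : List Char) (a : Char) (l : List Char) : pvRuns T a l ≠ [] := by
  induction l generalizing T a with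
  | nil => simp [pvRuns]
  | cons b t ih => simp only [pvRuns]; split; all_goals simp [ih]

lemma pvRuns_length (T : List Char) (a : Char) (l : List Char) :
    (pvRuns T a l).length = 1 + pvTrans a l := by
  induction l generalizing T a with
  | nil => simp [pvRuns, pvTrans]
  | cons b t ih =>
    simp only [pvRuns, pvTrans]
    split
    · simp [ih]
    · simp [ih]; omega

lemma pvRuns_head_mem (T : List Char) (a : Char) (l : List Char)
    (hT : ∀ x ∈ T, x = a) (c : Char) :
    c ∈ (pvRuns T a l).headD [] ↔ c = a := by
  induction l generalizing T a with
  | nil =>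
    simp only [pvRuns, List.headD, List.mem_append, List.mem_singleton]
    constructor
    · rintro (h | h)
      · exact hT c h
      · exact h
    · intro h; exact Or.inr h
  | cons b t ih =>
    simp only [pvRuns]
    split
    · rename_i hab
      have hab' : a = b := by simpa using hab
      have hT' : ∀ x ∈ T ++ [a], x = b := by
        intro x hx
        rcases List.mem_append.mp hx with h | h
        · exact (hT x h).trans hab'
        · simp only [List.mem_singleton] at h; exact h.trans hab'
      rw [ih (T ++ [a]) b hT', hab']
    · simp only [List.headD_cons, List.mem_append, List.mem_singleton]
      constructor
      · rintro (h | h)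
        · exact hT c h
        · exact h
      · intro h; exact Or.inr h

lemma pvGetLastD_irrel {α : Type} (xs : List α) (h : xs ≠ []) (d d' : α) :
    xs.getLastD d = xs.getLastD d' := by
  rw [List.getLastD_eq_getLast?, List.getLastD_eq_getLast?,
    List.getLast?_eq_some_getLast h]
  simp

lemma pvRuns_last_mem (T : List Char) (a : Char) (l : List Char)
    (hT : ∀ x ∈ T, x = a) (c : Char) :
    c ∈ (pvRuns T a l).getLastD [] ↔ c = (a :: l).getLast (by simp) := by
  induction l generalizing T a with
  | nil =>
    simp only [pvRuns, List.getLastD_cons, List.getLastD_nil, List.mem_append,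
      List.mem_singleton, List.getLast_singleton]
    constructor
    · rintro (h | h)
      · exact hT c h
      · exact h
    · intro h; exact Or.inr h
  | cons b t ih =>
    simp only [pvRuns]
    have hlast : (a :: b :: t).getLast (by simp) = (b :: t).getLast (by simp) := by
      simp [List.getLast_cons]
    split
    · rename_i hab
      have hab' : a = b := by simpa using hab
      have hT' : ∀ x ∈ T ++ [a], x = b := by
        intro x hx
        rcases List.mem_append.mp hx with h | h
        · exact (hT x h).trans hab'
        · simp only [List.mem_singleton] at h; exact h.trans hab'
      rw [hlast]
      exact ih (T ++ [a]) b hT'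
    · rw [hlast, List.getLastD_cons,
        pvGetLastD_irrel (pvRuns [] b t) (pvRuns_ne_nil [] b t) (T ++ [a]) []]
      exact ih ([] : List Char) b (by simp) 

-- A's fold over adjacent pairs computes Bk ++ pvRuns T a l
lemma pvFold_runs (l : List Char) (a : Char) (Bk : List (List Char)) (T : List Char) :
    (((a :: l).zip l).foldl (fun st p => pvStepA st p.1 p.2) (Bk, T)).1
      ++ [(((a :: l).zip l).foldl (fun st p => pvStepA st p.1 p.2) (Bk, T)).2
            ++ [(a :: l).getLast (by simp)]]
    = Bk ++ pvRuns T a l := by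
  induction l generalizing a Bk T with
  | nil => simp [pvRuns, List.zip]
  | cons b t ih =>
    simp only [List.zip_cons_cons, List.foldl_cons]
    have hlast : (a :: b :: t).getLast (by simp) = (b :: t).getLast (by simp) := by
      simp [List.getLast_cons]
    by_cases hab : (a == b) = true
    · have hstep : pvStepA (Bk, T) (a, b).1 (a, b).2 = (Bk, T ++ [a]) := by
        simp [pvStepA, hab]
      rw [hstep, hlast]
      have hr : pvRuns T a (b :: t) = pvRuns (T ++ [a]) b t := by
        simp [pvRuns, hab]
      rw [hr]
      exact ih b Bk (T ++ [a])
    · have hstep : pvStepA (Bk, T) (a, b).1 (a, b).2 = (Bk ++ [T ++ [a]], []) := by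
        simp [pvStepA, hab]
      rw [hstep, hlast]
      have hr : pvRuns T a (b :: t) = (T ++ [a]) :: pvRuns [] b t := by
        simp [pvRuns, hab]
      rw [hr, ih b (Bk ++ [T ++ [a]]) [], List.append_assoc]
      simp

-- zip expressed as A's index map
lemma pvZip_eq_map (cs : List Char) (d : Char) :
    (PySem.List.pyRange 0 ((cs.length : Int) - 1) 1).map
      (fun i => (PySem.List.pyGetD cs i d, PySem.List.pyGetD cs (i + 1) d)) = cs.zip cs.tail := by
  apply List.ext_getElem
  · simp only [List.length_map, PySem.List.length_pyRange_one, List.length_zip,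
      List.length_tail]
    omega
  · intro k h1 h2
    have hk : k < cs.length - 1 := by
      simp [PySem.List.length_pyRange_one] at h1
      omega
    simp only [List.getElem_map, PySem.List.getElem_pyRange_one, List.getElem_zip,
      List.getElem_tail]
    have e2 : ((k : Nat) : Int) + 1 = (((k + 1 : Nat)) : Int) := by push_cast; ring
    rw [zero_add, e2, PySem.List.pyGetD_natCast, PySem.List.pyGetD_natCast,
      List.getD_eq_getElem cs d (by omega), List.getD_eq_getElem cs d (by omega)]

-- B's sum equals the transition count
lemma pvSum_trans (a : Char) (l : List Char) :
    (((a :: l).zip l).map (fun p => if p.1 ≠ p.2 then (1 : Int) else 0)).sum = (pvTrans a l : Int) := by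
  induction l generalizing a with
  | nil => simp [pvTrans]
  | cons b t ih =>
    simp only [List.zip_cons_cons, List.map_cons, List.sum_cons, ih, pvTrans]
    push_cast
    by_cases h : a = b <;> simp [h]

-- ===== VERDICT (by name: the statement is the Claim_ definition above) =====
theorem zad4PodpunktB_spec : Claim_equal_zad4PodpunktB := by
  intro line hdom hpre
  unfold Spec_zad4PodpunktB
  simp only [zad4PodpunktB, zad4PodpunktB_alt]
  have hne : line.toList ≠ [] := by
    intro h
    exact hpre (String.toList_inj.mp (h.trans rfl))
  cases hcs : line.toList with
  | nil => exact absurd hcs hne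
  | cons a l =>
    -- convert A's range fold to the zip fold
    have hfold : (PySem.List.pyRange 0 (((a :: l).length : Int) - 1) 1).foldl
        (fun st i => pvStepA st (PySem.List.pyGetD (a :: l) i ' ')
          (PySem.List.pyGetD (a :: l) (i + 1) ' ')) ([], [])
        = ((a :: l).zip ((a :: l).tail)).foldl (fun st p => pvStepA st p.1 p.2) ([], []) := by
      rw [← pvZip_eq_map (a :: l) ' ', List.foldl_map]
    have hlastidx : PySem.List.pyGetD (a :: l) (((a :: l).length : Int) - 1) ' '
        = (a :: l).getLast (by simp) := by
      rw [show (((a :: l).length : Int) - 1) = ((l.length : Nat) : Int) by push_cast [List.length_cons]; omega]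
      rw [PySem.List.pyGetD_natCast, List.getD_eq_getElem _ _ (by simp),
        List.getLast_eq_getElem]
      congr 1
    rw [hfold, hlastidx]
    have hruns := pvFold_runs l a [] []
    simp only [List.tail_cons] at hfold ⊢
    simp only [hruns]
    simp only [List.nil_append]
    -- B's pieces
    have hb0 : PySem.List.pyGetD (a :: l) 0 ' ' = a := PySem.List.pyGetD_zero_cons a l ' '
    have hbl : PySem.List.pyGetD (a :: l) (-1) ' ' = (a :: l).getLast (by simp) :=
      PySem.List.pyGetD_neg_one (a :: l) ' ' (by simp)
    rw [hb0, hbl, pvSum_trans a l]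
    by_cases ht : pvTrans a l = 1
    · -- exactly two runs
      have hlen2 : (pvRuns [] a l).length = 2 := by rw [pvRuns_length, ht]
      obtain ⟨r0, r1, hr⟩ := List.length_eq_two.mp hlen2
      have h0 : ∀ c, c ∈ r0 ↔ c = a := by
        intro c
        have := pvRuns_head_mem [] a l (by simp) c
        rw [hr] at this
        simpa using this
      have h1 : ∀ c, c ∈ r1 ↔ c = (a :: l).getLast (by simp) := by
        intro c
        have := pvRuns_last_mem [] a l (by simp) c
        rw [hr] at this
        simpa using this
      simp only [hr]
      simp only [List.length_cons, List.length_nil, List.getD_cons_zero, List.getD_cons_succ]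
      have m0 : ('1' ∉ r0) ↔ ¬ a = '1' := by
        rw [h0 '1']
        exact ⟨fun h h' => h h'.symm, fun h h' => h h'.symm⟩
      have m1 : ('0' ∉ r1) ↔ ¬ (a :: l).getLast (by simp : a :: l ≠ []) = '0' := by
        rw [h1 '0']
        exact ⟨fun h h' => h h'.symm, fun h h' => h h'.symm⟩
      have cb1 : (a == '1') = decide (a = '1') := by
        by_cases h : a = '1' <;> simp [h]
      have cb2 : ((a :: l).getLast (by simp : a :: l ≠ []) == '0')
          = decide ((a :: l).getLast (by simp : a :: l ≠ []) = '0') := by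
        by_cases h : (a :: l).getLast (by simp : a :: l ≠ []) = '0' <;> simp [h]
      rw [cb1, cb2]
      by_cases ha : a = '1' <;> by_cases hl : (a :: l).getLast (by simp : a :: l ≠ []) = '0' <;>
        simp [ht, m0, m1, ha, hl]
    · -- not exactly two runs: both sides false
      have hlen2 : (pvRuns [] a l).length ≠ 2 := by rw [pvRuns_length]; omega
      simp [hlen2, ht]
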